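-- pv_equiv track=rewrite | github.com/aridepai17/PYTHON-MASTERY | LEETCODE/checkifallcharactershaveequalnumberofoccurrences.py | areOccurencesEqual
-- ===== SOURCE A (Python) =====
-- def areOccurencesEqual(s):
--   freq = {}
--
--   for char in s:
--     if char in freq:
--       freq[char] += 1
--     else:
--       freq[char] = 1
--
--   frequencyValues = set(freq.values())
--   return len(frequencyValues) == 1
-- ===== SOURCE B (Python) =====
-- def areOccurencesEqual(s):
--   t = sorted(s)
--   lengths = set()
--   i = 0
--   n = len(t)
--   while i < n:
--     j = i + 1
--     while j < n and t[j] == t[i]: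
--       j += 1
--     lengths.add(j - i)
--     i = j
--   return len(lengths) == 1
-- ===== Notes on version B (the rewrite author's own statement) =====
-- stated objective: alternative
-- what changed: Replaces dict-based frequency counting plus a set of dict values by sort-then-scan: sort the string and collect the length of each run of equal characters into a set, returning whether that set has exactly one element.
import Mathlib
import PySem

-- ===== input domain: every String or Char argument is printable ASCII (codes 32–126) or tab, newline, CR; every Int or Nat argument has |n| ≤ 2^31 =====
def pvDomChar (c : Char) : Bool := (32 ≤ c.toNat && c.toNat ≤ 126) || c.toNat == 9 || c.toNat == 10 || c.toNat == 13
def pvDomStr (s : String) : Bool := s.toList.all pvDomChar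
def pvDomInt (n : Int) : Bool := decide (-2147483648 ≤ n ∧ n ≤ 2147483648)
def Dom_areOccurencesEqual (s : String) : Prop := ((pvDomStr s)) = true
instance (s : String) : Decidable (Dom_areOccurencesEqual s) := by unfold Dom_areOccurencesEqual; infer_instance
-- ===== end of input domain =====

-- B replaces dict-based frequency counting by sort-then-scan over runs of equal characters; objective: alternative algorithm (same result, not claimed faster).

-- ===== PORT A =====
-- for char in s: if char in freq: freq[char] += 1 else: freq[char] = 1; then set(freq.values()); len == 1
def areOccurencesEqual (s : String) : Bool :=
  let freq := s.toList.foldl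
    (fun d c => if d.contains c then d.modify c 0 (· + 1) else d.insert c (1 : Int))
    PySem.Dict.empty
  let frequencyValues := PySem.Set.ofList freq.values
  frequencyValues.length == 1

-- ===== PORT B =====
-- run lengths of a list: the outer while loop of Source B; the inner while (advance j past equal chars) is the takeWhile/dropWhile split
def pvRunLens : List Char → List Int
  | [] => []
  | c :: rest =>
    ((rest.takeWhile (fun x => x == c)).length + 1 : Int) ::
      pvRunLens (rest.dropWhile (fun x => x == c))
termination_by l => l.length
decreasing_by
  simp only [List.length_cons]
  exact Nat.lt_succ_of_le (List.Sublist.length_le (List.dropWhile_sublist _))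

def areOccurencesEqual_alt (s : String) : Bool :=
  let t := PySem.List.sorted s.toList id
  let lengths := PySem.Set.ofList (pvRunLens t)
  lengths.length == 1

-- ===== PRECONDITION & SPEC =====
def Spec_areOccurencesEqual (s : String) (out : Bool) : Prop := out = areOccurencesEqual_alt s
instance (s : String) (out : Bool) : Decidable (Spec_areOccurencesEqual s out) := by unfold Spec_areOccurencesEqual; infer_instance

-- ===== CLAIM (what is proved, stated in full; the proofs are below) =====
def Claim_equal_areOccurencesEqual : Prop := ∀ (s : String), Dom_areOccurencesEqual s → Spec_areOccurencesEqual s (areOccurencesEqual s)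

-- ===== LEMMAS AND PROOFS =====

-- A's loop body is exactly the Counter step
theorem pvStep_eq_counter_step (d : PySem.Dict Char Int) (c : Char) :
    (if d.contains c then d.modify c 0 (· + 1) else d.insert c (1 : Int)) = d.modify c 0 (· + 1) := by
  by_cases h : d.contains c = true
  · simp [h]
  · simp only [Bool.not_eq_true] at h
    simp [h, PySem.Dict.modify, PySem.Dict.insert, PySem.Dict.getD_of_not_contains d 0 h]

theorem pvFreq_eq_counter (l : List Char) :
    l.foldl (fun d c => if d.contains c then d.modify c 0 (· + 1) else d.insert c (1 : Int))
      PySem.Dict.empty = PySem.Dict.counter l := by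
  rw [PySem.Dict.counter_eq_foldl]
  have hf : (fun (d : PySem.Dict Char Int) (c : Char) =>
      if d.contains c then d.modify c 0 (· + 1) else d.insert c (1 : Int))
      = fun d c => d.modify c 0 (· + 1) := by
    funext d c; exact pvStep_eq_counter_step d c
  rw [hf]

-- run lengths of a sorted list are exactly the multiplicities of its elements
theorem pvMem_runLens (t : List Char) (h : t.Pairwise (· ≤ ·)) (x : Int) :
    x ∈ pvRunLens t ↔ ∃ c ∈ t, x = (t.count c : Int) := by
  induction t using pvRunLens.induct with
  | case1 => simp [pvRunLens]
  | case2 c rest ih =>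
    have hsplit : rest = rest.takeWhile (fun x => x == c) ++ rest.dropWhile (fun x => x == c) :=
      (List.takeWhile_append_dropWhile).symm
    have htake : ∀ y ∈ rest.takeWhile (fun x => x == c), y = c := by
      intro y hy
      have := List.mem_takeWhile_imp hy
      simpa using this
    have hrest : rest.Pairwise (· ≤ ·) := h.of_cons
    have hdropsub : (rest.dropWhile (fun x => x == c)).Sublist rest := List.dropWhile_sublist _
    have hdrop : (rest.dropWhile (fun x => x == c)).Pairwise (· ≤ ·) := hrest.sublist hdropsub
    -- every element of the dropped part differs from c
    have hne : ∀ y ∈ rest.dropWhile (fun x => x == c), y ≠ c := by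
      intro y hy
      cases hd : rest.dropWhile (fun x => x == c) with
      | nil => simp [hd] at hy
      | cons z zs =>
        have hz : ¬ (z == c) = true := by
          have := List.head?_dropWhile_not (p := fun x => x == c) (l := rest)
          rw [hd] at this; simpa using this
        have hzc : z ≠ c := by simpa using hz
        have hcz : c ≤ z := by
          have hzrest : z ∈ rest := hdropsub.mem (by simp [hd])
          exact (List.pairwise_cons.mp h).1 z hzrest
        have hzlt : c < z := lt_of_le_of_ne hcz (Ne.symm hzc)
        rw [hd] at hy
        rcases List.mem_cons.mp hy with rfl | hy'
        · exact hzc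
        · -- y after z in a sorted list: z ≤ y, so c < y
          have hzy : z ≤ y := by
            have := (List.pairwise_cons.mp (hd ▸ hdrop)).1 y hy'
            exact this
          exact ne_of_gt (lt_of_lt_of_le hzlt hzy)
    have hcount_c : ((c :: rest).count c : Int) = ((rest.takeWhile (fun x => x == c)).length + 1 : Int) := by
      have h1 : rest.count c = (rest.takeWhile (fun x => x == c)).length := by
        conv_lhs => rw [hsplit]
        rw [List.count_append]
        have ha : (rest.takeWhile (fun x => x == c)).count c = (rest.takeWhile (fun x => x == c)).length :=
          List.count_eq_length.mpr (fun y hy => by simp [htake y hy])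
        have hb : (rest.dropWhile (fun x => x == c)).count c = 0 :=
          List.count_eq_zero.mpr (fun hc => hne c hc rfl)
        omega
      rw [List.count_cons_self, h1]
      push_cast
      ring
    have hcount_drop : ∀ c' ∈ rest.dropWhile (fun x => x == c),
        (c :: rest).count c' = (rest.dropWhile (fun x => x == c)).count c' := by
      intro c' hc'
      have hc'c : c' ≠ c := hne c' hc'
      have hccf : ¬ ((c == c') = true) := by simp [Ne.symm hc'c]
      conv_lhs => rw [hsplit]
      rw [List.count_cons, List.count_append, if_neg hccf]
      have : (rest.takeWhile (fun x => x == c)).count c' = 0 :=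
        List.count_eq_zero.mpr (fun hmem => hc'c (htake c' hmem))
      omega
    rw [pvRunLens]
    simp only [List.mem_cons]
    constructor
    · rintro (rfl | hx)
      · exact ⟨c, by simp, by rw [hcount_c]⟩
      · rcases (ih hdrop).mp hx with ⟨c', hc', rfl⟩
        refine ⟨c', Or.inr (hdropsub.mem hc'), ?_⟩
        rw [hcount_drop c' hc']
    · rintro ⟨c', hc', rfl⟩
      rcases hc' with rfl | hc'rest
      · left; rw [hcount_c]
      · -- c' is in rest: either it equals c (in the take part) or lies in the drop part
        by_cases hcc : c' = c
        · subst hcc; left; rw [hcount_c]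
        · have hc'drop : c' ∈ rest.dropWhile (fun x => x == c) := by
            have := hsplit ▸ hc'rest
            rcases List.mem_append.mp this with htk | hdr
            · exact absurd (htake c' htk) hcc
            · exact hdr
          right
          exact (ih hdrop).mpr ⟨c', hc'drop, congrArg Nat.cast (hcount_drop c' hc'drop)⟩

-- the frequency-value multiset of A and the run-length list of B have the same members
theorem pvSets_perm (l : List Char) :
    (PySem.Set.ofList ((PySem.Dict.counter l).values)).Perm
      (PySem.Set.ofList (pvRunLens (PySem.List.sorted l id))) := by
  have hperm : (PySem.List.sorted l id).Perm l := PySem.List.sorted_perm l id false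
  have hpw : (PySem.List.sorted l id).Pairwise (· ≤ ·) := by
    have := PySem.List.sorted_pairwise (xs := l) (key := id)
    simpa using this
  apply (List.perm_ext_iff_of_nodup (PySem.Set.nodup_ofList _) (PySem.Set.nodup_ofList _)).mpr
  intro x
  rw [PySem.Set.mem_ofList, PySem.Set.mem_ofList]  -- membership in set(...)
  have hvals : (PySem.Dict.counter l).values = (PySem.Set.ofList l).map (fun k => (l.count k : Int)) := by
    simp [PySem.Dict.values, PySem.Dict.items_counter]
  rw [hvals, pvMem_runLens _ hpw x]
  simp only [List.mem_map]
  constructor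
  · rintro ⟨k, hk, rfl⟩
    exact ⟨k, hperm.mem_iff.mpr ((PySem.Set.mem_ofList _ _).mp hk),
      by rw [hperm.count_eq]⟩
  · rintro ⟨c, hc, rfl⟩
    exact ⟨c, (PySem.Set.mem_ofList _ _).mpr (hperm.mem_iff.mp hc),
      by rw [hperm.count_eq]⟩

-- ===== VERDICT (by name: the statement is the Claim_ definition above) =====
theorem areOccurencesEqual_spec : Claim_equal_areOccurencesEqual := by
  intro s _
  unfold Spec_areOccurencesEqual areOccurencesEqual areOccurencesEqual_alt
  simp only [pvFreq_eq_counter, (pvSets_perm s.toList).length_eq]
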